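-- pv_equiv track=rewrite | github.com/Ramnath-Karthikesan/kriyadocs-hackathon | hackathon/final.py | index_of_uniq
-- ===== SOURCE A (Python) =====
-- def index_of_uniq(arr):
--     count = {}
--     for i in arr:
--         if i not in count:
--             count[i] = 1
--         else:
--             count[i] += 1
--     uniq = []
--     j = 1
--     for i in count:
--         if count[i] == 1:
--             uniq.append(j)
--         j+=1
--     return uniq
-- ===== SOURCE B (Python) =====
-- def index_of_uniq(arr):
--     rank = {}
--     uniq = {}
--     for x in arr:
--         if x in rank:
--             uniq.pop(x, None)
--         else:
--             rank[x] = len(rank) + 1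
--             uniq[x] = rank[x]
--     return list(uniq.values())
-- ===== Notes on version B (the rewrite author's own statement) =====
-- stated objective: alternative
-- what changed: Replaces A's two staged passes (build a full count table, then walk its keys with a position counter) by a single pass that never counts: each new element is assigned its rank and tentatively stored in an answer dict, and is evicted the moment it repeats; the answer is that dict's values.
import Mathlib
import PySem

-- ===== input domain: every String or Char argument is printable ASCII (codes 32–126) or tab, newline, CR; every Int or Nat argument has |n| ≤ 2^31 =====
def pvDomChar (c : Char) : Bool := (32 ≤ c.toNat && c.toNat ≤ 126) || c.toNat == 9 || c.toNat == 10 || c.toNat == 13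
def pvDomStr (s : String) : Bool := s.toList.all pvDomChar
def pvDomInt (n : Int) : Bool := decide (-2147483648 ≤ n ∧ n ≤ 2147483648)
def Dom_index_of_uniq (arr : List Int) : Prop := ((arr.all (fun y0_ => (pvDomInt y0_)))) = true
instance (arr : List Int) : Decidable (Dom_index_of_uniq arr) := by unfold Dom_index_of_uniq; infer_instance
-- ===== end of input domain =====

-- B is an alternative one-pass algorithm: it never counts — it assigns each new element its rank and
-- keeps it in an answer dict, evicting it on a repeat; A builds a full count table and then walks its
-- keys with a position counter. Return values proved equal on all inputs.

-- ===== PORT A =====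
-- count[i] = 1 / count[i] += 1 loop, then a walk over the dict's keys with a 1-based position counter j.
def index_of_uniq (arr : List Int) : List Int :=
  let count : PySem.Dict Int Int :=
    arr.foldl (fun d i => if d.contains i then d.insert i (d.getD i 0 + 1) else d.insert i 1)
      PySem.Dict.empty
  -- 'count[i]' inside the loop over count's keys never raises; getD 0 is exact there
  (count.keys.foldl
    (fun (s : List Int × Int) i =>
      ((if count.getD i 0 == 1 then s.1 ++ [s.2] else s.1), s.2 + 1))
    ([], 1)).1

-- ===== PORT B =====
-- one pass: on first sight record rank and tentatively keep x in uniq; on a repeat evict it.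
-- 'uniq.pop(x, None)' discards the returned value, so it is exactly Dict.erase here.
def index_of_uniq_alt (arr : List Int) : List Int :=
  (arr.foldl
    (fun (st : PySem.Dict Int Int × PySem.Dict Int Int) x =>
      if st.1.contains x then (st.1, st.2.erase x)
      else
        let r : Int := (st.1.size : Int) + 1
        (st.1.insert x r, st.2.insert x r))
    (PySem.Dict.empty, PySem.Dict.empty)).2.values

-- ===== PRECONDITION & SPEC =====
def Spec_index_of_uniq (arr : List Int) (out : List Int) : Prop := out = index_of_uniq_alt arr
instance (arr : List Int) (out : List Int) : Decidable (Spec_index_of_uniq arr out) := by unfold Spec_index_of_uniq; infer_instance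

-- ===== CLAIM =====
def Claim_equal_index_of_uniq : Prop := ∀ (arr : List Int), Dom_index_of_uniq arr → Spec_index_of_uniq arr (index_of_uniq arr)

-- ===== LEMMAS AND PROOFS =====

-- A's build loop is the standard counter loop (both branches insert getD+1, since getD is 0 on a fresh key)
lemma build_eq_counter (arr : List Int) :
    arr.foldl (fun d i => if d.contains i then d.insert i (d.getD i 0 + 1) else d.insert i 1)
      PySem.Dict.empty = PySem.Dict.counter arr := by
  rw [← PySem.Dict.foldl_insert_getD_add_one_eq_counter]
  apply PySem.List.foldl_congr_mem
  intro d i _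
  by_cases h : d.contains i = true
  · simp [h]
  · simp only [Bool.not_eq_true] at h
    simp [h, pysem]

-- A's j-counting walk equals the enumerate/filter/map comprehension
lemma walk_eq_enumerate (l : List Int) (p : Int → Bool) (acc : List Int) (j : Int) :
    (l.foldl (fun (s : List Int × Int) i =>
        ((if p i then s.1 ++ [s.2] else s.1), s.2 + 1)) (acc, j)).1
    = acc ++ ((PySem.List.enumerate l j).filter (fun q => p q.2)).map (fun q => q.1) := by
  induction l generalizing acc j with
  | nil => simp [PySem.List.enumerate_nil]
  | cons x t ih =>
    simp only [List.foldl_cons, PySem.List.enumerate_cons, List.filter_cons]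
    by_cases h : p x = true
    · simp [h, ih]
    · simp only [Bool.not_eq_true] at h
      simp [h, ih]

-- the rank dict B maintains: each first-seen element paired with its 1-based rank
def rankItems (l : List Int) : List (Int × Int) :=
  (PySem.List.enumerate (PySem.List.dedup l) 1).map (fun q => (q.2, q.1))

-- map of first components of rankItems is the dedup list itself
lemma map_fst_rankItems (l : List Int) : (rankItems l).map (fun p => p.1) = PySem.List.dedup l := by
  simp only [rankItems, List.map_map]
  exact PySem.List.map_snd_enumerate _ _

lemma contains_rankItems (l : List Int) (x : Int) :
    (PySem.Dict.mk (rankItems l)).contains x = true ↔ x ∈ l := by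
  rw [PySem.Dict.contains_iff_mem_keys]
  simp only [PySem.Dict.keys, map_fst_rankItems]
  exact PySem.List.mem_dedup _ _

-- invariant of B's single pass: rank holds rankItems, uniq holds its count-1 entries
lemma fold_invariant (l : List Int) :
    l.foldl
      (fun (st : PySem.Dict Int Int × PySem.Dict Int Int) x =>
        if st.1.contains x then (st.1, st.2.erase x)
        else
          let r : Int := (st.1.size : Int) + 1
          (st.1.insert x r, st.2.insert x r))
      (PySem.Dict.empty, PySem.Dict.empty)
    = (PySem.Dict.mk (rankItems l),
       PySem.Dict.mk ((rankItems l).filter (fun p => l.count p.1 == 1))) := by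
  induction l using List.reverseRecOn with
  | nil => rfl
  | append_singleton l x ih =>
    rw [List.foldl_append, ih, List.foldl_cons, List.foldl_nil]
    by_cases hx : x ∈ l
    · have hc : (PySem.Dict.mk (rankItems l)).contains x = true := (contains_rankItems l x).mpr hx
      have hded : PySem.List.dedup (l ++ [x]) = PySem.List.dedup l := by
        simp only [PySem.List.dedup_eq_ofList, PySem.Set.ofList_append_singleton]
        exact PySem.Set.add_of_mem (by simpa using (PySem.List.mem_dedup l x).mpr hx)
      have hrank : rankItems (l ++ [x]) = rankItems l := by
        unfold rankItems; rw [hded]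
      simp only [hc, if_true, hrank]
      refine Prod.ext rfl ?_
      simp only [PySem.Dict.erase, List.filter_filter]
      congr 1
      apply List.filter_congr
      intro p _
      by_cases hpx : p.1 = x
      · have h1 : 0 < l.count x := List.count_pos_iff.mpr hx
        have hcnt : (l ++ [x]).count x = l.count x + 1 := by
          simp [List.count_append]
        simp only [hpx, beq_self_eq_true, Bool.not_true, Bool.false_and]
        rw [hcnt, eq_comm, beq_eq_false_iff_ne]
        omega
      · have h0 : (l ++ [x]).count p.1 = l.count p.1 := by
          simp [List.count_append,
            (show ¬ x = p.1 from fun h => hpx h.symm)]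
        simp [h0]
        exact fun _ => hpx
    · have hc : (PySem.Dict.mk (rankItems l)).contains x = false := by
        rw [Bool.eq_false_iff]
        intro h
        exact hx ((contains_rankItems l x).mp h)
      have hxd : x ∉ PySem.List.dedup l := fun h => hx ((PySem.List.mem_dedup l x).mp h)
      have hded : PySem.List.dedup (l ++ [x]) = PySem.List.dedup l ++ [x] := by
        simp only [PySem.List.dedup_eq_ofList, PySem.Set.ofList_append_singleton]
        exact PySem.Set.add_of_not_mem (by simpa [PySem.List.dedup_eq_ofList] using hxd)
      have hsize : ((PySem.Dict.mk (rankItems l)).size : Int) + 1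
          = 1 + ((PySem.List.dedup l).length : Int) := by
        simp only [PySem.Dict.size, rankItems, List.length_map, PySem.List.length_enumerate]
        ring
      have hrank : rankItems (l ++ [x])
          = rankItems l ++ [(x, 1 + ((PySem.List.dedup l).length : Int))] := by
        unfold rankItems
        rw [hded, PySem.List.enumerate_append, List.map_append]
        simp [PySem.List.enumerate_cons, PySem.List.enumerate_nil]
      have hcu : (PySem.Dict.mk ((rankItems l).filter (fun p => l.count p.1 == 1))).contains x = false := by
        rw [Bool.eq_false_iff]
        intro h
        rw [PySem.Dict.contains_iff_mem_keys] at h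
        simp only [PySem.Dict.keys, List.mem_map] at h
        obtain ⟨p, hp, hpe⟩ := h
        have : p.1 ∈ (rankItems l).map (fun p => p.1) :=
          List.mem_map.mpr ⟨p, (List.mem_filter.mp hp).1, rfl⟩
        rw [map_fst_rankItems] at this
        exact hxd (hpe ▸ this)
      simp only [hc, if_false, Bool.false_eq_true]
      rw [hrank]
      refine Prod.ext ?_ ?_
      · apply PySem.Dict.ext
        rw [PySem.Dict.items_insert_of_not_contains _ _ hc]
        simp [hsize]
      · apply PySem.Dict.ext
        rw [PySem.Dict.items_insert_of_not_contains _ _ hcu]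
        simp only [List.filter_append]
        congr 1
        · apply List.filter_congr
          intro p hp
          have hpd : p.1 ∈ PySem.List.dedup l := by
            rw [← map_fst_rankItems]
            exact List.mem_map.mpr ⟨p, hp, rfl⟩
          have hpx : p.1 ≠ x := fun h => hxd (h ▸ hpd)
          simp [List.count_append,
            (show ¬ x = p.1 from fun h => hpx h.symm)]
        · simp [hsize, List.count_eq_zero_of_not_mem hx]

-- ===== VERDICT =====
theorem index_of_uniq_spec : Claim_equal_index_of_uniq := by
  intro arr _
  unfold Spec_index_of_uniq index_of_uniq index_of_uniq_alt
  simp only [build_eq_counter, PySem.Dict.keys_counter, ← PySem.List.dedup_eq_ofList]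
  rw [walk_eq_enumerate, fold_invariant]
  simp only [List.nil_append, PySem.Dict.values, rankItems, List.filter_map, List.map_map]
  congr 1
  · apply List.filter_congr
    intro q _
    simp [PySem.Dict.getD_counter]
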